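-- pv_equiv track=rewrite | github.com/cvsubs74/college-expert | agents/uniminer/cloud_function/main.py | categorize_missing_fields
-- ===== SOURCE A (Python) =====
-- from typing import Any, Dict, List, Optional
--
-- def categorize_missing_fields(fields: List[str]) -> Dict[str, List[str]]:
--     """Group missing fields by category for focused searches."""
--     categories = {
--         "admissions": [],
--         "academics": [],
--         "financials": [],
--         "outcomes": [],
--         "application": [],
--         "other": []
--     }
--
--     for field in fields:
--         if "admission" in field.lower() or "acceptance" in field.lower() or "gpa" in field.lower():
--             categories["admissions"].append(field)
--         elif "academic" in field.lower() or "major" in field.lower() or "college" in field.lower():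
--             categories["academics"].append(field)
--         elif "financial" in field.lower() or "tuition" in field.lower() or "scholarship" in field.lower():
--             categories["financials"].append(field)
--         elif "outcome" in field.lower() or "earning" in field.lower() or "employment" in field.lower():
--             categories["outcomes"].append(field)
--         elif "application" in field.lower() or "essay" in field.lower() or "deadline" in field.lower():
--             categories["application"].append(field)
--         else:
--             categories["other"].append(field)
--
--     # Remove empty categories
--     return {k: v for k, v in categories.items() if v}
-- ===== SOURCE B (Python) =====
-- def categorize_missing_fields(fields):
--     """Group missing fields by category for focused searches."""
--     table = [
--         ("admissions", ("admission", "acceptance", "gpa")),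
--         ("academics", ("academic", "major", "college")),
--         ("financials", ("financial", "tuition", "scholarship")),
--         ("outcomes", ("outcome", "earning", "employment")),
--         ("application", ("application", "essay", "deadline")),
--     ]
--     result = {}
--     remaining = fields
--     for cat, kws in table:
--         matched, rest = [], []
--         for f in remaining:
--             low = f.lower()
--             for kw in kws:
--                 if kw in low:
--                     matched.append(f)
--                     break
--             else:
--                 rest.append(f)
--         if matched:
--             result[cat] = matched
--         remaining = rest
--     if remaining:
--         result["other"] = remaining
--     return result
-- ===== Notes on version B (the rewrite author's own statement) =====
-- stated objective: alternative
-- what changed: A makes one field-major pass appending each field into one of six pre-seeded buckets (re-lowercasing the field in every test) and filters out empty buckets at the end; B is category-major: for each category in order it partitions the not-yet-claimed fields into matches and rest in a single pass (one lowercase per field per stage), emitting only non-empty groups, with leftovers becoming 'other'.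
import Mathlib
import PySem

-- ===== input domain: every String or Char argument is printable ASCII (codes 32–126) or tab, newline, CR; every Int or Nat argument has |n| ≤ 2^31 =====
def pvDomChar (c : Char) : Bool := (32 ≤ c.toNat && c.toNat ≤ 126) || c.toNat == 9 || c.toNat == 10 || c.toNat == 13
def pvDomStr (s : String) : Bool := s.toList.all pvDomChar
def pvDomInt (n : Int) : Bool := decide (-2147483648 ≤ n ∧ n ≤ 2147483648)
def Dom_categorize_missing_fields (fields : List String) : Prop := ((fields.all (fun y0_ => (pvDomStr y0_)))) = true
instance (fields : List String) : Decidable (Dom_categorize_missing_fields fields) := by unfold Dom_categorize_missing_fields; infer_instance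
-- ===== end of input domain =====

-- B replaces A's field-major single pass over six pre-seeded buckets (plus a final empty-bucket filter)
-- by a category-major staged partition: one pass per category splitting the not-yet-claimed fields into
-- matches and rest, emitting only non-empty groups; objective: alternative (same cost, different traversal).

-- ===== PORT A =====
-- A's loop body: the six-way if/elif chain, re-lowercasing the field in every test
def pvStepA (cats : PySem.Dict String (List String)) (field : String) : PySem.Dict String (List String) :=
  if PySem.Str.isIn "admission" (PySem.Str.lower field) || PySem.Str.isIn "acceptance" (PySem.Str.lower field) || PySem.Str.isIn "gpa" (PySem.Str.lower field) then
    cats.modify "admissions" [] (· ++ [field])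
  else if PySem.Str.isIn "academic" (PySem.Str.lower field) || PySem.Str.isIn "major" (PySem.Str.lower field) || PySem.Str.isIn "college" (PySem.Str.lower field) then
    cats.modify "academics" [] (· ++ [field])
  else if PySem.Str.isIn "financial" (PySem.Str.lower field) || PySem.Str.isIn "tuition" (PySem.Str.lower field) || PySem.Str.isIn "scholarship" (PySem.Str.lower field) then
    cats.modify "financials" [] (· ++ [field])
  else if PySem.Str.isIn "outcome" (PySem.Str.lower field) || PySem.Str.isIn "earning" (PySem.Str.lower field) || PySem.Str.isIn "employment" (PySem.Str.lower field) then
    cats.modify "outcomes" [] (· ++ [field])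
  else if PySem.Str.isIn "application" (PySem.Str.lower field) || PySem.Str.isIn "essay" (PySem.Str.lower field) || PySem.Str.isIn "deadline" (PySem.Str.lower field) then
    cats.modify "application" [] (· ++ [field])
  else
    cats.modify "other" [] (· ++ [field])

def categorize_missing_fields (fields : List String) : List (String × List String) :=
  let categories : PySem.Dict String (List String) :=
    PySem.Dict.ofList [("admissions", []), ("academics", []), ("financials", []),
                       ("outcomes", []), ("application", []), ("other", [])]
  let final := fields.foldl pvStepA categories
  -- {k: v for k, v in categories.items() if v}
  final.items.filter (fun kv => !kv.2.isEmpty)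

-- ===== PORT B =====
-- B's (category, keywords) table, in the original category order
def pvTable : List (String × List String) :=
  [("admissions", ["admission", "acceptance", "gpa"]),
   ("academics", ["academic", "major", "college"]),
   ("financials", ["financial", "tuition", "scholarship"]),
   ("outcomes", ["outcome", "earning", "employment"]),
   ("application", ["application", "essay", "deadline"])]

-- B's inner loop: one pass over `remaining`, lowercasing each field once and routing it to
-- this category's matches or to the rest (the for/break/else is the short-circuit `any`)
def pvSplit (kws : List String) : List String → List String × List String
  | [] => ([], [])
  | f :: fs =>
      let low := PySem.Str.lower f
      let (matched, rest) := pvSplit kws fs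
      if kws.any (fun kw => PySem.Str.isIn kw low) then (f :: matched, rest) else (matched, f :: rest)

-- B's loop over the table: record this category's matches only when non-empty
-- (result dict keys are fresh, so the dict is an appended list)
def pvBLoop : List (String × List String) → List (String × List String) → List String →
    List (String × List String) × List String
  | [], res, remaining => (res, remaining)
  | (cat, kws) :: rest, res, remaining =>
      let (matched, rest') := pvSplit kws remaining
      let res' := if matched.isEmpty then res else res ++ [(cat, matched)]
      pvBLoop rest res' rest'

def categorize_missing_fields_alt (fields : List String) : List (String × List String) :=
  let (res, remaining) := pvBLoop pvTable [] fields
  if remaining.isEmpty then res else res ++ [("other", remaining)]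

-- ===== PRECONDITION & SPEC =====
def Spec_categorize_missing_fields (fields : List String) (out : List (String × List String)) : Prop := out = categorize_missing_fields_alt fields
instance (fields : List String) (out : List (String × List String)) : Decidable (Spec_categorize_missing_fields fields out) := by unfold Spec_categorize_missing_fields; infer_instance

-- ===== CLAIM (what is proved, stated in full; the proofs are below) =====
def Claim_equal_categorize_missing_fields : Prop := ∀ (fields : List String), Dom_categorize_missing_fields fields → Spec_categorize_missing_fields fields (categorize_missing_fields fields)

-- ===== LEMMAS AND PROOFS =====

-- the five keyword tests, on the lowered field
def pvM1 (f : String) : Bool := PySem.Str.isIn "admission" (PySem.Str.lower f) || PySem.Str.isIn "acceptance" (PySem.Str.lower f) || PySem.Str.isIn "gpa" (PySem.Str.lower f)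
def pvM2 (f : String) : Bool := PySem.Str.isIn "academic" (PySem.Str.lower f) || PySem.Str.isIn "major" (PySem.Str.lower f) || PySem.Str.isIn "college" (PySem.Str.lower f)
def pvM3 (f : String) : Bool := PySem.Str.isIn "financial" (PySem.Str.lower f) || PySem.Str.isIn "tuition" (PySem.Str.lower f) || PySem.Str.isIn "scholarship" (PySem.Str.lower f)
def pvM4 (f : String) : Bool := PySem.Str.isIn "outcome" (PySem.Str.lower f) || PySem.Str.isIn "earning" (PySem.Str.lower f) || PySem.Str.isIn "employment" (PySem.Str.lower f)
def pvM5 (f : String) : Bool := PySem.Str.isIn "application" (PySem.Str.lower f) || PySem.Str.isIn "essay" (PySem.Str.lower f) || PySem.Str.isIn "deadline" (PySem.Str.lower f)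

-- the effective membership predicate of each bucket (first match wins)
def pvP2 (f : String) : Bool := pvM2 f && !pvM1 f
def pvP3 (f : String) : Bool := pvM3 f && (!pvM2 f && !pvM1 f)
def pvP4 (f : String) : Bool := pvM4 f && (!pvM3 f && (!pvM2 f && !pvM1 f))
def pvP5 (f : String) : Bool := pvM5 f && (!pvM4 f && (!pvM3 f && (!pvM2 f && !pvM1 f)))
def pvP6 (f : String) : Bool := !pvM5 f && (!pvM4 f && (!pvM3 f && (!pvM2 f && !pvM1 f)))

-- pvSplit is the pair of complementary filters
theorem pvSplit_eq (kws : List String) (l : List String) :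
    pvSplit kws l =
      (l.filter (fun f => kws.any (fun kw => PySem.Str.isIn kw (PySem.Str.lower f))),
       l.filter (fun f => !kws.any (fun kw => PySem.Str.isIn kw (PySem.Str.lower f)))) := by
  induction l with
  | nil => rfl
  | cons f fs ih =>
    simp only [pvSplit, ih, List.filter_cons]
    split_ifs with h1 h2 h3 <;> simp_all
    obtain ⟨x, hx, he⟩ := h1
    have hfx := h2 x hx
    simp [hfx] at he

theorem pvStepA_eq (cats : PySem.Dict String (List String)) (f : String) :
    pvStepA cats f =
      if pvM1 f then cats.modify "admissions" [] (· ++ [f])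
      else if pvM2 f then cats.modify "academics" [] (· ++ [f])
      else if pvM3 f then cats.modify "financials" [] (· ++ [f])
      else if pvM4 f then cats.modify "outcomes" [] (· ++ [f])
      else if pvM5 f then cats.modify "application" [] (· ++ [f])
      else cats.modify "other" [] (· ++ [f]) := rfl

-- A's fold over the fields fills each bucket with the fields whose first match is that bucket
theorem pvFoldA (fs : List String) (v1 v2 v3 v4 v5 v6 : List String) :
    fs.foldl pvStepA (PySem.Dict.mk [("admissions", v1), ("academics", v2), ("financials", v3),
                                     ("outcomes", v4), ("application", v5), ("other", v6)]) =
    PySem.Dict.mk [("admissions", v1 ++ fs.filter pvM1), ("academics", v2 ++ fs.filter pvP2),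
                   ("financials", v3 ++ fs.filter pvP3), ("outcomes", v4 ++ fs.filter pvP4),
                   ("application", v5 ++ fs.filter pvP5), ("other", v6 ++ fs.filter pvP6)] := by
  induction fs generalizing v1 v2 v3 v4 v5 v6 with
  | nil => simp
  | cons f fs ih =>
    rw [List.foldl_cons, pvStepA_eq]
    by_cases h1 : pvM1 f
    · simp only [h1, if_true]
      simp only [PySem.Dict.modify, PySem.Dict.insert, PySem.Dict.getD, PySem.Dict.get?,
        PySem.Dict.contains, PySem.Dict.items]
      simp [ih, List.filter_cons, pvP2, pvP3, pvP4, pvP5, pvP6, h1]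
    · by_cases h2 : pvM2 f
      · simp only [h1, h2, if_true, if_false]
        simp only [PySem.Dict.modify, PySem.Dict.insert, PySem.Dict.getD, PySem.Dict.get?,
          PySem.Dict.contains, PySem.Dict.items]
        simp [ih, List.filter_cons, pvP2, pvP3, pvP4, pvP5, pvP6, h1, h2]
      · by_cases h3 : pvM3 f
        · simp only [h1, h2, h3, if_true, if_false]
          simp only [PySem.Dict.modify, PySem.Dict.insert, PySem.Dict.getD, PySem.Dict.get?,
            PySem.Dict.contains, PySem.Dict.items]
          simp [ih, List.filter_cons, pvP2, pvP3, pvP4, pvP5, pvP6, h1, h2, h3]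
        · by_cases h4 : pvM4 f
          · simp only [h1, h2, h3, h4, if_true, if_false]
            simp only [PySem.Dict.modify, PySem.Dict.insert, PySem.Dict.getD, PySem.Dict.get?,
              PySem.Dict.contains, PySem.Dict.items]
            simp [ih, List.filter_cons, pvP2, pvP3, pvP4, pvP5, pvP6, h1, h2, h3, h4]
          · by_cases h5 : pvM5 f
            · simp only [h1, h2, h3, h4, h5, if_true, if_false]
              simp only [PySem.Dict.modify, PySem.Dict.insert, PySem.Dict.getD, PySem.Dict.get?,
                PySem.Dict.contains, PySem.Dict.items]
              simp [ih, List.filter_cons, pvP2, pvP3, pvP4, pvP5, pvP6, h1, h2, h3, h4, h5]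
            · simp only [h1, h2, h3, h4, h5, if_false]
              simp only [PySem.Dict.modify, PySem.Dict.insert, PySem.Dict.getD, PySem.Dict.get?,
                PySem.Dict.contains, PySem.Dict.items]
              simp [ih, List.filter_cons, pvP2, pvP3, pvP4, pvP5, pvP6, h1, h2, h3, h4, h5]

set_option maxHeartbeats 1000000 in
theorem categorize_missing_fields_eq (fields : List String) :
    categorize_missing_fields fields = categorize_missing_fields_alt fields := by
  simp only [categorize_missing_fields, categorize_missing_fields_alt]
  rw [show (PySem.Dict.ofList [(("admissions" : String), ([] : List String)), ("academics", []), ("financials", []),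
        ("outcomes", []), ("application", []), ("other", [])]) =
      PySem.Dict.mk [("admissions", []), ("academics", []), ("financials", []),
        ("outcomes", []), ("application", []), ("other", [])] from rfl]
  rw [pvFoldA]
  simp only [pvBLoop, pvTable, pvSplit_eq, List.any_cons, List.any_nil, Bool.or_false, List.filter_filter]
  simp only [PySem.Dict.items, List.nil_append]
  simp only [← Bool.or_assoc]
  simp only [← pvM1.eq_1, ← pvM2.eq_1, ← pvM3.eq_1, ← pvM4.eq_1, ← pvM5.eq_1]
  simp only [← pvP2.eq_1, ← pvP3.eq_1, ← pvP4.eq_1, ← pvP5.eq_1, ← pvP6.eq_1]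
  generalize List.filter pvM1 fields = F1
  generalize List.filter pvP2 fields = F2
  generalize List.filter pvP3 fields = F3
  generalize List.filter pvP4 fields = F4
  generalize List.filter pvP5 fields = F5
  generalize List.filter pvP6 fields = F6
  by_cases e1 : F1.isEmpty <;> by_cases e2 : F2.isEmpty <;> by_cases e3 : F3.isEmpty <;>
    by_cases e4 : F4.isEmpty <;> by_cases e5 : F5.isEmpty <;> by_cases e6 : F6.isEmpty <;>
    simp [List.filter_cons, e1, e2, e3, e4, e5, e6]

-- ===== VERDICT (by name: the statement is the Claim_ definition above) =====
theorem categorize_missing_fields_spec : Claim_equal_categorize_missing_fields := by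
  intro fields _
  exact categorize_missing_fields_eq fields
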